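-- pv_equiv track=rewrite | github.com/svan-b/docx-anonymizer-app | process_adobe_word_files.py | categorize_and_sort_aliases
-- ===== SOURCE A (Python) =====
-- def categorize_and_sort_aliases(alias_map):
--     """
--     Bulletproof 3-tier sorting to prevent cascading failures.
--
--     Processing order:
--     1. Company names with suffixes (Inc., Corp., LLC, etc.)
--     2. Multi-word phrases
--     3. Single words and tickers
--
--     Within each tier: longest first
--     """
--     company_suffixes = ['Inc.', 'Corp.', 'Corporation', 'LLC', 'L.L.C.', 'Ltd.', 'Limited', 'Co.', 'Company']
--
--     tier1_company = []  # Company names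
--     tier2_multiword = []  # Multi-word phrases
--     tier3_single = []  # Single words/tickers
--
--     for original in alias_map.keys():
--         # Tier 1: Company names with suffixes
--         if any(suffix in original for suffix in company_suffixes):
--             tier1_company.append(original)
--         # Tier 2: Multi-word phrases
--         elif ' ' in original:
--             tier2_multiword.append(original)
--         # Tier 3: Single words/tickers
--         else:
--             tier3_single.append(original)
--
--     # Sort each tier by length (longest first)
--     tier1_company.sort(key=len, reverse=True)
--     tier2_multiword.sort(key=len, reverse=True)
--     tier3_single.sort(key=len, reverse=True)
--
--     # Combine in order
--     sorted_keys = tier1_company + tier2_multiword + tier3_single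
--
--     return sorted_keys
-- ===== SOURCE B (Python) =====
-- def categorize_and_sort_aliases(alias_map):
--     """Single stable sort with a composite (tier, -length) key instead of three
--     partitioned buckets each sorted and concatenated."""
--     company_suffixes = ['Inc.', 'Corp.', 'Corporation', 'LLC', 'L.L.C.', 'Ltd.', 'Limited', 'Co.', 'Company']
--
--     def tier_rank(key):
--         if any(suffix in key for suffix in company_suffixes):
--             return 0
--         if ' ' in key:
--             return 1
--         return 2
--
--     return sorted(alias_map.keys(), key=lambda k: (tier_rank(k), -len(k)))
-- ===== Notes on version B (the rewrite author's own statement) =====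
-- stated objective: simpler
-- what changed: Replaced the three partitioned tier buckets, each sorted by length descending and concatenated, with a single stable sort of all keys under a composite (tier_rank, -len) key.
import Mathlib
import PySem

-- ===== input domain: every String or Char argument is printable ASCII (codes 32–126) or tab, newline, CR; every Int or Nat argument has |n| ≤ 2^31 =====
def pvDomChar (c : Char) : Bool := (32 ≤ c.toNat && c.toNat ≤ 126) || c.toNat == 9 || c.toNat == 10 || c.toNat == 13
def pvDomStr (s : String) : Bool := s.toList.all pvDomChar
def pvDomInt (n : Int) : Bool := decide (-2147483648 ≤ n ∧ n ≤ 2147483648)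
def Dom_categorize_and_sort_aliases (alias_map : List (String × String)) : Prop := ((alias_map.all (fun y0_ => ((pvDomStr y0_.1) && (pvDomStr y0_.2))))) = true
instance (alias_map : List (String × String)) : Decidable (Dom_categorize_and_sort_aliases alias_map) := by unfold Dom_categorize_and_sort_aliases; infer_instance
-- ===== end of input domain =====

-- B replaces A's three sorted-and-concatenated tier buckets by one stable sort with a
-- composite (tier, -length) key: simpler (one pass, one sort), same exact output.

-- ===== PORT A =====
def pvCompanySuffixes : List String :=
  ["Inc.", "Corp.", "Corporation", "LLC", "L.L.C.", "Ltd.", "Limited", "Co.", "Company"]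

def categorize_and_sort_aliases (alias_map : List (String × String)) : List String :=
  let tiers := (PySem.Dict.ofList alias_map).keys.foldl
    (fun (t : List String × List String × List String) original =>
      if pvCompanySuffixes.any (fun suffix => PySem.Str.isIn suffix original) then
        (t.1 ++ [original], t.2.1, t.2.2)
      else if PySem.Str.isIn " " original then
        (t.1, t.2.1 ++ [original], t.2.2)
      else
        (t.1, t.2.1, t.2.2 ++ [original]))
    ([], [], [])
  let tier1_company := PySem.List.sorted tiers.1 PySem.Str.len true
  let tier2_multiword := PySem.List.sorted tiers.2.1 PySem.Str.len true
  let tier3_single := PySem.List.sorted tiers.2.2 PySem.Str.len true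
  tier1_company ++ tier2_multiword ++ tier3_single

-- ===== PORT B =====
def pvTierRank (key : String) : Int :=
  if pvCompanySuffixes.any (fun suffix => PySem.Str.isIn suffix key) then 0
  else if PySem.Str.isIn " " key then 1
  else 2

def categorize_and_sort_aliases_alt (alias_map : List (String × String)) : List String :=
  PySem.List.sorted2 (PySem.Dict.ofList alias_map).keys
    pvTierRank (fun k => -(PySem.Str.len k)) false

-- ===== PRECONDITION & SPEC =====
def Spec_categorize_and_sort_aliases (alias_map : List (String × String)) (out : List String) : Prop := out = categorize_and_sort_aliases_alt alias_map
instance (alias_map : List (String × String)) (out : List String) : Decidable (Spec_categorize_and_sort_aliases alias_map out) := by unfold Spec_categorize_and_sort_aliases; infer_instance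

-- ===== CLAIM (what is proved, stated in full; the proofs are below) =====
def Claim_equal_categorize_and_sort_aliases : Prop := ∀ (alias_map : List (String × String)), Dom_categorize_and_sort_aliases alias_map → Spec_categorize_and_sort_aliases alias_map (categorize_and_sort_aliases alias_map)

-- ===== LEMMAS AND PROOFS =====

-- B's composite comparison (the `before` predicate sorted2 uses with reverse=false)
def pvBefore2 (a b : String) : Bool :=
  decide (pvTierRank a < pvTierRank b) ||
    (!decide (pvTierRank b < pvTierRank a) && decide (-(PySem.Str.len a) < -(PySem.Str.len b)))

-- A's per-tier comparison (the `before` predicate sorted … true uses)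
def pvBrev (a b : String) : Bool := decide (PySem.Str.len b < PySem.Str.len a)

lemma insertBy_cons {α : Type} (before : α → α → Bool) (x a : α) (l : List α) :
    PySem.List.insertBy before x (a :: l) =
      if before x a then x :: a :: l else a :: PySem.List.insertBy before x l := by
  simp [PySem.List.insertBy]

lemma insertBy_skip {α : Type} (before : α → α → Bool) (x : α) (pre suf : List α)
    (h : ∀ y ∈ pre, before x y = false) :
    PySem.List.insertBy before x (pre ++ suf) = pre ++ PySem.List.insertBy before x suf := by
  induction pre with
  | nil => simp
  | cons a t ih =>
      rw [List.cons_append, insertBy_cons, if_neg (by simp [h a (by simp)])]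
      rw [ih (fun y hy => h y (by simp [hy])), List.cons_append]

lemma insertBy_into_head {α : Type} (b b' : α → α → Bool) (x : α) (mid suf : List α)
    (hmid : ∀ y ∈ mid, b x y = b' x y)
    (hsuf : suf = [] ∨ ∃ z zs, suf = z :: zs ∧ b x z = true) :
    PySem.List.insertBy b x (mid ++ suf) = PySem.List.insertBy b' x mid ++ suf := by
  induction mid with
  | nil =>
      rcases hsuf with h | ⟨z, zs, rfl, hz⟩
      · subst h; simp [PySem.List.insertBy]
      · simp [PySem.List.insertBy, insertBy_cons, hz]
  | cons a t ih =>
      have ha : b x a = b' x a := hmid a (by simp)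
      rw [List.cons_append, insertBy_cons, insertBy_cons, ha]
      by_cases hba : b' x a = true
      · simp [hba]
      · rw [if_neg (by simp [hba]), if_neg (by simp [hba])]
        rw [ih (fun y hy => hmid y (by simp [hy])), List.cons_append]

lemma insertBy_congr {α : Type} (b b' : α → α → Bool) (x : α) (l : List α)
    (h : ∀ y ∈ l, b x y = b' x y) :
    PySem.List.insertBy b x l = PySem.List.insertBy b' x l := by
  have := insertBy_into_head b b' x l [] h (Or.inl rfl)
  simpa using this

lemma pvTierRank_cases (x : String) : pvTierRank x = 0 ∨ pvTierRank x = 1 ∨ pvTierRank x = 2 := by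
  unfold pvTierRank; split_ifs <;> simp

lemma pvBefore2_eq_brev (x y : String) (h : pvTierRank x = pvTierRank y) :
    pvBefore2 x y = pvBrev x y := by
  simp [pvBefore2, pvBrev, h]

lemma pvBefore2_false (x y : String) (h : pvTierRank y < pvTierRank x) :
    pvBefore2 x y = false := by
  simp [pvBefore2]; omega

lemma pvBefore2_true (x y : String) (h : pvTierRank x < pvTierRank y) :
    pvBefore2 x y = true := by
  simp [pvBefore2]; omega

lemma mem_insertBy_rank (before : String → String → Bool) (x : String) (l : List String)
    (r : Int) (hx : pvTierRank x = r) (hl : ∀ y ∈ l, pvTierRank y = r) :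
    ∀ y ∈ PySem.List.insertBy before x l, pvTierRank y = r := by
  intro y hy
  rcases (PySem.List.mem_insertBy before x y l).mp hy with h | h
  · exact h ▸ hx
  · exact hl y h

-- the core: one stable sort with the composite key splits into the three per-tier sorts
lemma fold_split (xs : List String) :
    ∀ (l0 l1 l2 : List String),
      (∀ y ∈ l0, pvTierRank y = 0) → (∀ y ∈ l1, pvTierRank y = 1) → (∀ y ∈ l2, pvTierRank y = 2) →
      xs.foldl (fun acc x => PySem.List.insertBy pvBefore2 x acc) (l0 ++ (l1 ++ l2))
      = (xs.filter (fun x => pvTierRank x == 0)).foldl (fun acc x => PySem.List.insertBy pvBrev x acc) l0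
        ++ ((xs.filter (fun x => pvTierRank x == 1)).foldl (fun acc x => PySem.List.insertBy pvBrev x acc) l1
        ++ (xs.filter (fun x => pvTierRank x == 2)).foldl (fun acc x => PySem.List.insertBy pvBrev x acc) l2) := by
  induction xs with
  | nil => intro l0 l1 l2 _ _ _; simp
  | cons x t ih =>
      intro l0 l1 l2 h0 h1 h2
      rw [List.foldl_cons, List.filter_cons, List.filter_cons, List.filter_cons]
      rcases pvTierRank_cases x with hx | hx | hx
      · have hstep : PySem.List.insertBy pvBefore2 x (l0 ++ (l1 ++ l2))
            = PySem.List.insertBy pvBrev x l0 ++ (l1 ++ l2) := by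
          apply insertBy_into_head
          · intro y hy; exact pvBefore2_eq_brev x y (by rw [hx, h0 y hy])
          · cases l1 with
            | cons z zs => exact Or.inr ⟨z, zs ++ l2, by simp, pvBefore2_true x z (by rw [hx, h1 z (by simp)]; norm_num)⟩
            | nil =>
                cases l2 with
                | nil => exact Or.inl rfl
                | cons z zs => exact Or.inr ⟨z, zs, by simp, pvBefore2_true x z (by rw [hx, h2 z (by simp)]; norm_num)⟩
        rw [hstep, ih (PySem.List.insertBy pvBrev x l0) l1 l2
          (mem_insertBy_rank pvBrev x l0 0 hx h0) h1 h2]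
        simp [hx]
      · have hstep : PySem.List.insertBy pvBefore2 x (l0 ++ (l1 ++ l2))
            = l0 ++ (PySem.List.insertBy pvBrev x l1 ++ l2) := by
          rw [insertBy_skip pvBefore2 x l0 (l1 ++ l2)
            (fun y hy => pvBefore2_false x y (by rw [hx, h0 y hy]; norm_num))]
          congr 1
          apply insertBy_into_head
          · intro y hy; exact pvBefore2_eq_brev x y (by rw [hx, h1 y hy])
          · cases l2 with
            | nil => exact Or.inl rfl
            | cons z zs => exact Or.inr ⟨z, zs, rfl, pvBefore2_true x z (by rw [hx, h2 z (by simp)]; norm_num)⟩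
        rw [hstep, ih l0 (PySem.List.insertBy pvBrev x l1) l2
          h0 (mem_insertBy_rank pvBrev x l1 1 hx h1) h2]
        simp [hx]
      · have hstep : PySem.List.insertBy pvBefore2 x (l0 ++ (l1 ++ l2))
            = l0 ++ (l1 ++ PySem.List.insertBy pvBrev x l2) := by
          rw [insertBy_skip pvBefore2 x l0 (l1 ++ l2)
            (fun y hy => pvBefore2_false x y (by rw [hx, h0 y hy]; norm_num))]
          congr 1
          rw [insertBy_skip pvBefore2 x l1 l2
            (fun y hy => pvBefore2_false x y (by rw [hx, h1 y hy]; norm_num))]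
          congr 1
          exact insertBy_congr pvBefore2 pvBrev x l2
            (fun y hy => pvBefore2_eq_brev x y (by rw [hx, h2 y hy]))
        rw [hstep, ih l0 l1 (PySem.List.insertBy pvBrev x l2)
          h0 h1 (mem_insertBy_rank pvBrev x l2 2 hx h2)]
        simp [hx]

-- A's partitioning loop builds exactly the three filtered sublists
lemma tiers_eq (xs : List String) :
    ∀ (a b c : List String),
      xs.foldl
        (fun (t : List String × List String × List String) original =>
          if pvCompanySuffixes.any (fun suffix => PySem.Str.isIn suffix original) then
            (t.1 ++ [original], t.2.1, t.2.2)
          else if PySem.Str.isIn " " original then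
            (t.1, t.2.1 ++ [original], t.2.2)
          else
            (t.1, t.2.1, t.2.2 ++ [original]))
        (a, b, c)
      = (a ++ xs.filter (fun x => pvTierRank x == 0),
         b ++ xs.filter (fun x => pvTierRank x == 1),
         c ++ xs.filter (fun x => pvTierRank x == 2)) := by
  induction xs with
  | nil => intro a b c; simp
  | cons x t ih =>
      intro a b c
      rw [List.foldl_cons, List.filter_cons, List.filter_cons, List.filter_cons]
      by_cases hs : (pvCompanySuffixes.any fun suffix => PySem.Str.isIn suffix x) = true
      · have hr : pvTierRank x = 0 := by rw [pvTierRank, if_pos hs]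
        rw [if_pos hs, ih]
        simp [hr]
      · rw [if_neg hs]
        by_cases hsp : PySem.Str.isIn " " x = true
        · have hr : pvTierRank x = 1 := by rw [pvTierRank, if_neg hs, if_pos hsp]
          rw [if_pos hsp, ih]
          simp [hr]
        · have hr : pvTierRank x = 2 := by rw [pvTierRank, if_neg hs, if_neg hsp]
          rw [if_neg hsp, ih]
          simp [hr]

-- ===== VERDICT (by name: the statement is the Claim_ definition above) =====
theorem categorize_and_sort_aliases_spec : Claim_equal_categorize_and_sort_aliases := by
  intro alias_map _
  unfold Spec_categorize_and_sort_aliases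
  unfold categorize_and_sort_aliases categorize_and_sort_aliases_alt
  set ks := (PySem.Dict.ofList alias_map).keys with hks
  have hB : PySem.List.sorted2 ks pvTierRank (fun k => -(PySem.Str.len k)) false
      = ks.foldl (fun acc x => PySem.List.insertBy pvBefore2 x acc) [] := by
    rfl
  have hA : ∀ (l : List String), PySem.List.sorted l PySem.Str.len true
      = l.foldl (fun acc x => PySem.List.insertBy pvBrev x acc) [] := by
    intro l; rfl
  rw [hB, tiers_eq ks [] [] []]
  simp only [List.nil_append, hA]
  have := fold_split ks [] [] [] (by simp) (by simp) (by simp)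
  simp only [List.nil_append] at this
  rw [this, List.append_assoc]
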